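-- pv_equiv track=rewrite | github.com/jorgetzec/scientific-article-aggregator | src/article_processor/post_generator_new.py | _trim_post
-- ===== SOURCE A (Python) =====
-- def _trim_post(post: str, max_words: int) -> str:
--     """Recorta el post a un número máximo de palabras."""
--     words = post.split()
--     if len(words) <= max_words:
--         return post
--
--     # Mantener secciones completas
--     sections = post.split('\n\n')
--     trimmed_sections = []
--     current_length = 0
--
--     for section in sections:
--         section_words = len(section.split())
--         if current_length + section_words <= max_words:
--             trimmed_sections.append(section)
--             current_length += section_words
--         else:
--             break
--
--     return '\n\n'.join(trimmed_sections)
-- ===== SOURCE B (Python) =====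
-- from itertools import accumulate
-- from bisect import bisect_right
--
--
-- def _trim_post(post: str, max_words: int) -> str:
--     """Recorta el post a un número máximo de palabras."""
--     if len(post.split()) <= max_words:
--         return post
--     sections = post.split('\n\n')
--     cumulative = list(accumulate(len(s.split()) for s in sections))
--     cut = bisect_right(cumulative, max_words)
--     return '\n\n'.join(sections[:cut])
-- ===== Notes on version B (the rewrite author's own statement) =====
-- stated objective: alternative
-- what changed: Replaced the incremental accumulate-and-break loop over sections by a prefix-sum table of section word counts (itertools.accumulate) queried with bisect_right to find how many leading sections fit.
import Mathlib
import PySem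

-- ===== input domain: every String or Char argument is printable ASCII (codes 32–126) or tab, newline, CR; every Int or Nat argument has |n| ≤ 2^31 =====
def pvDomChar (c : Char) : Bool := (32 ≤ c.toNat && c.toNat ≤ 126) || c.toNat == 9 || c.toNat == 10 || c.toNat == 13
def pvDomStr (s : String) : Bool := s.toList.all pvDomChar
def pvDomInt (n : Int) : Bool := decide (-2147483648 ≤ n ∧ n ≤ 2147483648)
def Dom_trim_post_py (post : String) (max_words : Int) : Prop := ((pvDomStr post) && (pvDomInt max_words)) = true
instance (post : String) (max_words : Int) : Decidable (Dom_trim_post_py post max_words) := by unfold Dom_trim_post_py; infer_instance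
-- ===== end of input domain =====

-- B replaces A's accumulate-and-break loop over sections by a prefix-sum table of
-- section word counts binary-searched with bisect_right (alternative decomposition, same cost).

-- ===== PORT A =====
-- the 'for section in sections: … else: break' loop, with its running word count
def trimA_go (max_words : Int) : List String → Int → List String
  | [], _ => []
  | s :: rest, cur =>
    let w : Int := ((PySem.Str.split₀ s).length : Int)
    if cur + w ≤ max_words then s :: trimA_go max_words rest (cur + w) else []

def trim_post_py (post : String) (max_words : Int) : String :=
  let words := PySem.Str.split₀ post
  if (words.length : Int) ≤ max_words then post
  else
    -- post.split("\n\n"): sep is the nonempty literal "\n\n", so split? is some; exact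
    let sections := (PySem.Str.split? post "\n\n").getD []
    PySem.Str.join "\n\n" (trimA_go max_words sections 0)

-- ===== PORT B =====
-- itertools.accumulate of a list of ints (running sums)
def bAccum : List Int → Int → List Int
  | [], _ => []
  | x :: xs, run => (run + x) :: bAccum xs (run + x)

-- bisect.bisect_right: standard lo/hi binary search, exact transliteration
def bBisect (a : List Int) (x : Int) (lo hi : Nat) : Nat :=
  if _h : lo < hi then
    if x < a.getD ((lo + hi) / 2) 0 then bBisect a x lo ((lo + hi) / 2)
    else bBisect a x ((lo + hi) / 2 + 1) hi
  else lo
termination_by hi - lo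
decreasing_by all_goals omega

def trim_post_py_alt (post : String) (max_words : Int) : String :=
  if ((PySem.Str.split₀ post).length : Int) ≤ max_words then post
  else
    -- post.split("\n\n"): sep is the nonempty literal "\n\n", so split? is some; exact
    let sections := (PySem.Str.split? post "\n\n").getD []
    let cumulative := bAccum (sections.map (fun s => ((PySem.Str.split₀ s).length : Int))) 0
    let cut := bBisect cumulative max_words 0 cumulative.length
    PySem.Str.join "\n\n" (sections.take cut)

-- ===== PRECONDITION & SPEC =====
def Spec_trim_post_py (post : String) (max_words : Int) (out : String) : Prop := out = trim_post_py_alt post max_words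
instance (post : String) (max_words : Int) (out : String) : Decidable (Spec_trim_post_py post max_words out) := by unfold Spec_trim_post_py; infer_instance

-- ===== CLAIM (what is proved, stated in full; the proofs are below) =====
def Claim_equal_trim_post_py : Prop := ∀ (post : String) (max_words : Int), Dom_trim_post_py post max_words → Spec_trim_post_py post max_words (trim_post_py post max_words)

-- ===== LEMMAS AND PROOFS =====

-- index of the first element > x (length of the ≤-x prefix); the value bisect_right returns
def firstGt (x : Int) : List Int → Nat
  | [] => 0
  | c :: rest => if x < c then 0 else firstGt x rest + 1

theorem bAccum_lower (l : List Int) (c : Int) (h : ∀ y ∈ l, 0 ≤ y) :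
    ∀ z ∈ bAccum l c, c ≤ z := by
  induction l generalizing c with
  | nil => simp [bAccum]
  | cons y ys ih =>
    intro z hz
    simp only [bAccum, List.mem_cons] at hz
    rcases hz with rfl | hz
    · have := h y (by simp); omega
    · have hy := h y (by simp)
      have := ih (c + y) (fun a ha => h a (by simp [ha])) z hz
      omega

theorem bAccum_pairwise (l : List Int) (c : Int) (h : ∀ y ∈ l, 0 ≤ y) :
    List.Pairwise (· ≤ ·) (bAccum l c) := by
  induction l generalizing c with
  | nil => simp [bAccum]
  | cons y ys ih =>
    simp only [bAccum, List.pairwise_cons]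
    exact ⟨fun z hz => bAccum_lower ys (c + y) (fun a ha => h a (by simp [ha])) z hz,
           ih (c + y) (fun a ha => h a (by simp [ha]))⟩

theorem firstGt_le_length (x : Int) (a : List Int) : firstGt x a ≤ a.length := by
  induction a with
  | nil => simp [firstGt]
  | cons c rest ih =>
    simp only [firstGt]
    split
    · simp
    · simp only [List.length_cons]
      omega

theorem firstGt_below (x : Int) (a : List Int) :
    ∀ i < firstGt x a, a.getD i 0 ≤ x := by
  induction a with
  | nil => simp [firstGt]
  | cons c rest ih =>
    intro i hi
    simp only [firstGt] at hi
    split at hi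
    · omega
    · cases i with
      | zero => simpa using by omega
      | succ k => exact ih k (by omega)

theorem firstGt_at (x : Int) (a : List Int) (h : firstGt x a < a.length) :
    x < a.getD (firstGt x a) 0 := by
  induction a with
  | nil => simp [firstGt] at h
  | cons c rest ih =>
    by_cases hc : x < c
    · simp [firstGt, hc]
    · simp only [firstGt, hc, if_false] at h ⊢
      simp only [List.length_cons] at h
      simpa using ih (by omega)

theorem firstGt_above (x : Int) (a : List Int) (hp : List.Pairwise (· ≤ ·) a) :
    ∀ i, firstGt x a ≤ i → i < a.length → x < a.getD i 0 := by
  intro i hji hi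
  have hj : firstGt x a < a.length := lt_of_le_of_lt hji hi
  have h1 : x < a.getD (firstGt x a) 0 := firstGt_at x a hj
  rcases Nat.lt_or_ge (firstGt x a) i with hlt | hge
  · have := (List.pairwise_iff_getElem.mp hp) (firstGt x a) i hj hi hlt
    rw [List.getD_eq_getElem a 0 hi]
    rw [List.getD_eq_getElem a 0 hj] at h1
    omega
  · have : firstGt x a = i := by omega
    simpa [this] using h1

theorem bBisect_eq (a : List Int) (x : Int) (j : Nat)
    (H1 : ∀ i < j, a.getD i 0 ≤ x)
    (H2 : ∀ i, j ≤ i → i < a.length → x < a.getD i 0) :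
    ∀ n lo hi, hi - lo ≤ n → lo ≤ j → j ≤ hi → hi ≤ a.length → bBisect a x lo hi = j := by
  intro n
  induction n with
  | zero =>
    intro lo hi hn h1 h2 h3
    rw [bBisect]
    have : ¬ lo < hi := by omega
    simp [this]; omega
  | succ m ih =>
    intro lo hi hn h1 h2 h3
    rw [bBisect]
    split
    · next hlh =>
      have hmid1 : lo ≤ (lo + hi) / 2 := by omega
      have hmid2 : (lo + hi) / 2 < hi := by omega
      split
      · next hx =>
        -- x < a[mid] ⇒ j ≤ mid
        have hj : j ≤ (lo + hi) / 2 := by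
          by_contra hc
          have := H1 ((lo + hi) / 2) (by omega)
          omega
        exact ih lo ((lo + hi) / 2) (by omega) h1 hj (by omega)
      · next hx =>
        -- a[mid] ≤ x ⇒ mid < j
        have hj : (lo + hi) / 2 + 1 ≤ j := by
          by_contra hc
          have := H2 ((lo + hi) / 2) (by omega) (by omega)
          omega
        exact ih ((lo + hi) / 2 + 1) hi (by omega) hj h2 h3
    · next hlh => omega

-- A's loop takes exactly the ≤-max prefix of the cumulative sums
theorem trimA_go_eq_take (max_words : Int) (l : List String) (cur : Int) :
    trimA_go max_words l cur
      = l.take (firstGt max_words (bAccum (l.map (fun s => ((PySem.Str.split₀ s).length : Int))) cur)) := by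
  induction l generalizing cur with
  | nil => rfl
  | cons s rest ih =>
    simp only [trimA_go, List.map, bAccum, firstGt]
    by_cases h : cur + ((PySem.Str.split₀ s).length : Int) ≤ max_words
    · have h' : ¬ max_words < cur + ((PySem.Str.split₀ s).length : Int) := by omega
      simp [h, h', ih]
    · have h' : max_words < cur + ((PySem.Str.split₀ s).length : Int) := by omega
      simp [h, h']

-- ===== VERDICT (by name: the statement is the Claim_ definition above) =====
theorem trim_post_py_spec : Claim_equal_trim_post_py := by
  intro post max_words _
  unfold Spec_trim_post_py trim_post_py trim_post_py_alt
  by_cases h : ((PySem.Str.split₀ post).length : Int) ≤ max_words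
  · simp [h]
  · simp only [h]
    congr 1
    set sections := (PySem.Str.split? post "\n\n").getD [] with hs
    set counts := sections.map (fun s => ((PySem.Str.split₀ s).length : Int)) with hc
    set cum := bAccum counts 0 with hcum
    have hnn : ∀ y ∈ counts, 0 ≤ y := by
      intro y hy
      simp only [hc, List.mem_map] at hy
      obtain ⟨s, _, rfl⟩ := hy
      positivity
    have hpb : bBisect cum max_words 0 cum.length = firstGt max_words cum :=
      bBisect_eq cum max_words (firstGt max_words cum)
        (firstGt_below max_words cum)
        (firstGt_above max_words cum (bAccum_pairwise counts 0 hnn))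
        cum.length 0 cum.length (by omega) (by omega)
        (firstGt_le_length max_words cum) (le_refl _)
    rw [hpb, trimA_go_eq_take]
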